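-- pv_equiv track=rewrite | github.com/vfeng2023/AI | AI/AI 1/Unit 1/Word Ladders/wordladdersoptimize2.py | gen_children
-- ===== SOURCE A (Python) =====
-- def gen_children(word_list):
--     patterns = dict()
--     child_patterns = dict()
--     for i in range(len(word_list)):
--         child_patterns[word_list[i]] = []
--         for j in range(len(word_list[i])):
--             pat = word_list[i][:j]+"*"+word_list[i][j+1:]
--             child_patterns[word_list[i]].append(pat)
--             if pat in patterns:
--                 patterns[pat].append(word_list[i])
--
--             else:
--                 patterns[pat] = [word_list[i]]
--
--
--     return patterns,child_patterns
-- ===== SOURCE B (Python) =====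
-- def gen_children(word_list):
--     # Flat event stream: every (pattern, word) occurrence in A's traversal order.
--     events = [(w[:j] + "*" + w[j + 1:], w) for w in word_list for j in range(len(w))]
--     # Grouping by key: dedup the key sequence, then one scan of the events per distinct key.
--     pat_keys = list(dict.fromkeys(p for p, _ in events))
--     patterns = {p: [w for q, w in events if q == p] for p in pat_keys}
--     word_keys = list(dict.fromkeys(word_list))
--     child_patterns = {w: [w[:j] + "*" + w[j + 1:] for j in range(len(w))] for w in word_keys}
--     return patterns, child_patterns
-- ===== Notes on version B (the rewrite author's own statement) =====
-- stated objective: alternative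
-- what changed: B first materialises the flat (pattern, word) event stream, then builds patterns by deduplicating the key sequence and filtering the event list once per distinct pattern (dedup-then-scan grouping), and builds child_patterns over the deduplicated word list, instead of A's single interleaved index loop that grows both dicts incrementally; it trades A's one-pass dict accumulation for per-key scans (quadratic in the worst case).
import Mathlib
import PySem

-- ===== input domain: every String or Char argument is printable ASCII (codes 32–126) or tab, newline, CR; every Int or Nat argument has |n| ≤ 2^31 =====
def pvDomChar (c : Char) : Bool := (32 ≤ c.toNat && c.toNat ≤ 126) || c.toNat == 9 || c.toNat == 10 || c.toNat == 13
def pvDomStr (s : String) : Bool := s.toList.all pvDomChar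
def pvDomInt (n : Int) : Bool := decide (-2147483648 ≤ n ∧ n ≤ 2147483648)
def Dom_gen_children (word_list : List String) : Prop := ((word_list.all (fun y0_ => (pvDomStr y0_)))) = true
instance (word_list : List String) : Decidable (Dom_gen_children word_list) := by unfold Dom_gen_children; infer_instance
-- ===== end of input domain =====

-- B replaces A's single interleaved index loop (growing both dicts incrementally) by a flat
-- (pattern, word) event stream grouped by dedup-then-scan: an alternative algorithm, not faster.

-- shared helper: the Python expression w[:j] + "*" + w[j+1:]
def mkPat (w : String) (j : Int) : String :=
  String.ofList (PySem.List.slice w.toList none (some j) ++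
    '*' :: PySem.List.slice w.toList (some (j + 1)) none)

-- ===== PORT A =====
def gen_children (word_list : List String) :
    (List (String × List String)) × (List (String × List String)) :=
  -- patterns = dict(); child_patterns = dict(); for i in range(len(word_list)): …
  let st := (PySem.List.pyRange 0 (PySem.List.len word_list) 1).foldl
    (fun st i =>
      let w := PySem.List.pyGetD word_list i ""
      -- child_patterns[word_list[i]] = []
      let st := (st.1, st.2.insert w ([] : List String))
      -- for j in range(len(word_list[i])): …
      (PySem.List.pyRange 0 (PySem.Str.len w) 1).foldl
        (fun st j =>
          let pat := mkPat w j
          -- child_patterns[word_list[i]].append(pat)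
          let c := st.2.modify w [] (· ++ [pat])
          -- if pat in patterns: patterns[pat].append(word_list[i]) else: patterns[pat] = [word_list[i]]
          let p := if st.1.contains pat then st.1.modify pat ([] : List String) (· ++ [w])
                   else st.1.insert pat [w]
          (p, c)) st)
    ((PySem.Dict.empty : PySem.Dict String (List String)),
     (PySem.Dict.empty : PySem.Dict String (List String)))
  (st.1.items, st.2.items)

-- ===== PORT B =====
-- [w[:j] + "*" + w[j+1:] for j in range(len(w))]
def patsOf (w : String) : List String :=
  (PySem.List.pyRange 0 (PySem.Str.len w) 1).map (mkPat w)

def gen_children_alt (word_list : List String) :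
    (List (String × List String)) × (List (String × List String)) :=
  -- events = [(w[:j]+"*"+w[j+1:], w) for w in word_list for j in range(len(w))]
  let events : List (String × String) :=
    word_list.flatMap (fun w => (patsOf w).map (fun pat => (pat, w)))
  -- pat_keys = list(dict.fromkeys(p for p, _ in events))
  let patKeys : List String := PySem.List.dedup (events.map Prod.fst)
  -- patterns = {p: [w for q, w in events if q == p] for p in pat_keys}
  let patterns := patKeys.foldl
    (fun d p => d.insert p ((events.filter (fun e => e.1 == p)).map Prod.snd))
    (PySem.Dict.empty : PySem.Dict String (List String))
  -- word_keys = list(dict.fromkeys(word_list)); child_patterns = {w: pats(w) for w in word_keys}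
  let wordKeys : List String := PySem.List.dedup word_list
  let child := wordKeys.foldl (fun d w => d.insert w (patsOf w))
    (PySem.Dict.empty : PySem.Dict String (List String))
  (patterns.items, child.items)

-- ===== PRECONDITION & SPEC =====
def Spec_gen_children (word_list : List String) (out : (List (String × List String)) × (List (String × List String))) : Prop := out = gen_children_alt word_list
instance (word_list : List String) (out : (List (String × List String)) × (List (String × List String))) : Decidable (Spec_gen_children word_list out) := by unfold Spec_gen_children; infer_instance

-- ===== CLAIM (what is proved, stated in full; the proofs are below) =====
def Claim_equal_gen_children : Prop := ∀ (word_list : List String), Dom_gen_children word_list → Spec_gen_children word_list (gen_children word_list)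

-- ===== LEMMAS AND PROOFS =====

-- A's if-in-else update of patterns is exactly Dict.modify
lemma astep_eq_modify (p : PySem.Dict String (List String)) (pat w : String) :
    (if p.contains pat then p.modify pat ([] : List String) (· ++ [w]) else p.insert pat [w])
      = p.modify pat [] (· ++ [w]) := by
  by_cases h : p.contains pat = true
  · simp [h]
  · simp only [Bool.not_eq_true] at h
    simp [h, PySem.Dict.modify, PySem.Dict.getD_of_not_contains _ _ h]

-- appending to a just-inserted key is inserting the extended value
lemma modify_insert_append (c : PySem.Dict String (List String)) (w : String)
    (acc : List String) (pat : String) :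
    (c.insert w acc).modify w [] (· ++ [pat]) = c.insert w (acc ++ [pat]) := by
  simp [PySem.Dict.modify, PySem.Dict.getD_insert_self, PySem.Dict.insert_insert_self]

-- A's inner j-loop, run on any pattern list, splits into the two independent updates
lemma pair_fold (w : String) (pats : List String) :
    ∀ (p c : PySem.Dict String (List String)) (acc : List String),
    pats.foldl
      (fun st pat =>
        (if st.1.contains pat then st.1.modify pat ([] : List String) (· ++ [w])
         else st.1.insert pat [w],
         st.2.modify w [] (· ++ [pat])))
      (p, c.insert w acc)
      = (pats.foldl (fun p pat => p.modify pat [] (· ++ [w])) p, c.insert w (acc ++ pats)) := by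
  induction pats with
  | nil => intro p c acc; simp
  | cons pat t ih =>
    intro p c acc
    simp only [List.foldl_cons]
    rw [astep_eq_modify, modify_insert_append]
    rw [ih]
    simp

-- A's outer word loop computes the two folds independently
lemma main_fold (l : List String) :
    ∀ (p c : PySem.Dict String (List String)),
    l.foldl
      (fun st w =>
        (PySem.List.pyRange 0 (PySem.Str.len w) 1).foldl
          (fun st j =>
            (if st.1.contains (mkPat w j) then st.1.modify (mkPat w j) ([] : List String) (· ++ [w])
             else st.1.insert (mkPat w j) [w],
             st.2.modify w [] (· ++ [mkPat w j])))
          (st.1, st.2.insert w ([] : List String)))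
      (p, c)
      = (l.foldl (fun p w => (patsOf w).foldl (fun p pat => p.modify pat [] (· ++ [w])) p) p,
         l.foldl (fun c w => c.insert w (patsOf w)) c) := by
  induction l with
  | nil => intro p c; simp
  | cons w t ih =>
    intro p c
    simp only [List.foldl_cons]
    have h := pair_fold w ((PySem.List.pyRange 0 (PySem.Str.len w) 1).map (mkPat w)) p c []
    rw [List.foldl_map] at h
    rw [h]
    simp only [List.nil_append]
    rw [ih]
    rfl

-- A's patterns fold over words flattens to one fold over the event stream
lemma patterns_fold_flatten (l : List String) :
    ∀ (p : PySem.Dict String (List String)),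
    l.foldl (fun p w => (patsOf w).foldl (fun p pat => p.modify pat [] (· ++ [w])) p) p
      = (l.flatMap (fun w => (patsOf w).map (fun pat => (pat, w)))).foldl
          (fun d e => d.modify e.1 [] (· ++ [e.2])) p := by
  induction l with
  | nil => intro p; simp
  | cons w t ih =>
    intro p
    simp only [List.foldl_cons, List.flatMap_cons, List.foldl_append, List.foldl_map]
    exact ih _

-- a fold of key-determined inserts: lookup of a listed key
lemma child_getD (g : String → List String) (l : List String) :
    ∀ (d : PySem.Dict String (List String)) (x : String),
    (l.foldl (fun d w => d.insert w (g w)) d).getD x []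
      = if x ∈ l then g x else d.getD x [] := by
  induction l with
  | nil => intro d x; simp
  | cons w t ih =>
    intro d x
    simp only [List.foldl_cons]
    rw [ih]
    by_cases hx : x ∈ t
    · simp [hx]
    · by_cases hw : x = w
      · subst hw; simp [hx, PySem.Dict.getD_insert_self]
      · simp [hx, hw, PySem.Dict.getD_insert_of_ne _ _ _ hw]

-- a fold of key-determined inserts from empty: its items, via keys + lookups
lemma items_foldl_insert_keyfun (g : String → List String) (l : List String) :
    (l.foldl (fun d w => d.insert w (g w)) (PySem.Dict.empty : PySem.Dict String (List String))).items
      = (PySem.List.dedup l).map (fun w => (w, g w)) := by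
  set D := l.foldl (fun d w => d.insert w (g w)) (PySem.Dict.empty : PySem.Dict String (List String))
  have hnd : D.keys.Nodup :=
    PySem.Dict.nodup_keys_foldl_insert l (fun d w => g w) _ PySem.Dict.nodup_keys_empty
  have hkeys : D.keys = PySem.Set.ofList l := by
    simpa using PySem.Dict.keys_foldl_insert l (fun d w => g w)
      (PySem.Dict.empty : PySem.Dict String (List String))
  rw [PySem.Dict.items_eq_map_keys D hnd [], hkeys]
  rw [PySem.List.dedup_eq_ofList]
  refine List.map_congr_left ?_
  intro w hw
  have hmem : w ∈ l := (PySem.Set.mem_ofList l w).mp hw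
  show (w, D.getD w []) = (w, g w)
  rw [child_getD g l _ w]
  simp [hmem]

-- B's patterns dict: inserts over distinct fresh keys, items by items_foldl_insert_fresh
lemma items_b_patterns (ev : List (String × String)) :
    ((PySem.List.dedup (ev.map Prod.fst)).foldl
        (fun d p => d.insert p ((ev.filter (fun e => e.1 == p)).map Prod.snd))
        (PySem.Dict.empty : PySem.Dict String (List String))).items
      = (PySem.List.dedup (ev.map Prod.fst)).map
          (fun p => (p, (ev.filter (fun e => e.1 == p)).map Prod.snd)) := by
  have h := PySem.Dict.items_foldl_insert_fresh (l := PySem.List.dedup (ev.map Prod.fst))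
    (k := fun p => p) (v := fun p => (ev.filter (fun e => e.1 == p)).map Prod.snd)
    (d := (PySem.Dict.empty : PySem.Dict String (List String)))
    (by intro a _; simp) (by simp)
  simpa using h

-- A's patterns dict (as the event fold): its items are the dedup-then-filter grouping
lemma items_a_patterns (ev : List (String × String)) :
    (ev.foldl (fun d e => d.modify e.1 [] (· ++ [e.2]))
        (PySem.Dict.empty : PySem.Dict String (List String))).items
      = (PySem.List.dedup (ev.map Prod.fst)).map
          (fun p => (p, (ev.filter (fun e => e.1 == p)).map Prod.snd)) := by
  set D := ev.foldl (fun d e => d.modify e.1 [] (· ++ [e.2]))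
    (PySem.Dict.empty : PySem.Dict String (List String))
  have hnd : D.keys.Nodup := by
    have := PySem.Dict.nodup_keys_foldl_modify_key ev (fun e => e.1) []
      (fun _ e => (· ++ [e.2])) (PySem.Dict.empty : PySem.Dict String (List String))
      PySem.Dict.nodup_keys_empty
    simpa using this
  have hkeys : D.keys = PySem.Set.ofList (ev.map Prod.fst) := by
    have := PySem.Dict.keys_foldl_modify_key (l := ev) (key := fun e => e.1)
      (d0 := ([] : List String)) (f := fun _ e => (· ++ [e.2]))
      (d := (PySem.Dict.empty : PySem.Dict String (List String)))
    simpa using this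
  rw [PySem.Dict.items_eq_map_keys D hnd [], hkeys, ← PySem.List.dedup_eq_ofList]
  refine List.map_congr_left ?_
  intro p _
  show (p, D.getD p []) = _
  rw [PySem.Dict.getD_foldl_modify_append]
  simp

-- ===== VERDICT (by name: the statement is the Claim_ definition above) =====
theorem gen_children_spec : Claim_equal_gen_children := by
  intro word_list _
  unfold Spec_gen_children gen_children gen_children_alt
  simp only []
  rw [PySem.List.foldl_pyRange_zero_pyGetD word_list ""
    (fun st (w : String) =>
      List.foldl (fun st j =>
        (if st.1.contains (mkPat w j) = true then st.1.modify (mkPat w j) [] fun x => x ++ [w]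
         else st.1.insert (mkPat w j) [w],
         st.2.modify w [] fun x => x ++ [mkPat w j]))
        (st.1, st.2.insert w ([] : List String))
        (PySem.List.pyRange 0 (PySem.Str.len w)))
    (PySem.Dict.empty, PySem.Dict.empty)]
  rw [main_fold]
  refine Prod.ext ?_ ?_
  · -- patterns side
    show _ = _
    rw [patterns_fold_flatten, items_a_patterns, ← items_b_patterns]
  · -- child_patterns side
    show _ = _
    rw [items_foldl_insert_keyfun patsOf word_list, items_foldl_insert_keyfun patsOf (PySem.List.dedup word_list)]
    show List.map _ (PySem.List.dedup word_list) = List.map _ (PySem.List.dedup (PySem.List.dedup word_list))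
    congr 1
    rw [PySem.List.dedup_eq_ofList (PySem.List.dedup word_list)]
    exact (PySem.Set.ofList_eq_self_of_nodup _ (PySem.List.nodup_dedup word_list)).symm
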